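-- pv_equiv track=rewrite | github.com/shibukazu/ASR | projects/multitask-based-adaptive-noise-reduction/ctc_1_path_adaptation.py | vad_subsample
-- ===== SOURCE A (Python) =====
-- def vad_subsample(vad, kernel_size, stride):
--     n_subsample = (len(vad) - kernel_size + stride) // stride
--     subsampled_vad = []
--     for i in range(n_subsample):
--         sub = vad[i * stride : i * stride + kernel_size]
--         if len(sub) // 2 + 1 <= sum(sub):
--             subsampled_vad.append(1)
--         else:
--             subsampled_vad.append(0)
--     return subsampled_vad
-- ===== SOURCE B (Python) =====
-- def vad_subsample(vad, kernel_size, stride):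
--     # Majority vote per sliding window, computed from a prefix-sum array:
--     # each window's sum is a difference of two prefix values.
--     prefix = [0]
--     for v in vad:
--         prefix.append(prefix[-1] + v)
--     n_subsample = (len(vad) - kernel_size + stride) // stride
--     threshold = kernel_size // 2 + 1
--     return [
--         1 if prefix[i * stride + kernel_size] - prefix[i * stride] >= threshold else 0
--         for i in range(n_subsample)
--     ]
-- ===== Notes on version B (the rewrite author's own statement) =====
-- stated objective: alternative
-- what changed: B builds a prefix-sum array once and computes each window's majority vote from a difference of two prefix values, replacing A's per-window slice materialisation and summation; Pre_ restricts to the natural domain stride >= 1 and kernel_size >= 0: stride = 0 makes A raise ZeroDivisionError, and with a negative stride or negative kernel_size A's window bounds wrap around via Python negative-slice normalisation, an artefact of A's slicing on which B's prefix indexing raises or only accidentally agrees.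
-- outside the precondition, e.g. on vad_subsample([1, 0, 1], 5, -1): A returns [1, 1, 0], B raises IndexError; on vad_subsample([1, 1, 0], -2, 1): A returns [1, 1, 0, 0, 0, 0], B raises IndexError
import Mathlib
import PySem

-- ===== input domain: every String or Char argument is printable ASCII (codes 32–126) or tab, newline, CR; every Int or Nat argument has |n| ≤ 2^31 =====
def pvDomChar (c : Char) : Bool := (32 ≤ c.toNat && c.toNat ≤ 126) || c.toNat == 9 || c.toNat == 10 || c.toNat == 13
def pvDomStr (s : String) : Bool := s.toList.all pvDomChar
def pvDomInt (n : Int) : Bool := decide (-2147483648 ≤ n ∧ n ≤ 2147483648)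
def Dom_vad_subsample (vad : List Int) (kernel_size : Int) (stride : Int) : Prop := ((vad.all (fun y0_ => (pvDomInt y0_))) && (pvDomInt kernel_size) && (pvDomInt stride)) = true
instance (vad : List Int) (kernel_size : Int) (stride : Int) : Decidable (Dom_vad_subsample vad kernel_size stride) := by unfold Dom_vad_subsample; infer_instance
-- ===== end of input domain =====

-- B computes each window's majority vote from a prefix-sum array instead of slicing and summing every window (objective: alternative).

-- ===== PORT A =====
def vad_subsample (vad : List Int) (kernel_size : Int) (stride : Int) : List Int :=
  let n_subsample := PySem.Int.floordiv ((vad.length : Int) - kernel_size + stride) stride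
  (PySem.List.pyRange 0 n_subsample 1).foldl
    (fun subsampled_vad i =>
      let sub := PySem.List.slice vad (some (i * stride)) (some (i * stride + kernel_size))
      if PySem.Int.floordiv (sub.length : Int) 2 + 1 ≤ sub.sum then
        subsampled_vad ++ [1]
      else
        subsampled_vad ++ [0])
    []

-- ===== PORT B =====
-- Source B's prefix list [0, v0, v0+v1, …] built front-to-back
def pvPrefix (acc : Int) : List Int → List Int
  | [] => [acc]
  | v :: vs => acc :: pvPrefix (acc + v) vs

def vad_subsample_alt (vad : List Int) (kernel_size : Int) (stride : Int) : List Int :=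
  let prefix_ := pvPrefix 0 vad
  let n_subsample := PySem.Int.floordiv ((vad.length : Int) - kernel_size + stride) stride
  let threshold := PySem.Int.floordiv kernel_size 2 + 1
  (PySem.List.pyRange 0 n_subsample 1).map
    (fun i =>
      if threshold ≤ PySem.List.pyGetD prefix_ (i * stride + kernel_size) 0
                     - PySem.List.pyGetD prefix_ (i * stride) 0
      then 1 else 0)

-- ===== PRECONDITION & SPEC =====
-- Pre_ restricts to the natural domain stride ≥ 1 and kernel_size ≥ 0: at stride = 0 the Python A
-- raises ZeroDivisionError, and with a negative stride or negative kernel_size A's window bounds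
-- wrap around via Python negative-slice normalisation, an artefact of A's slicing on which B raises
-- (IndexError) or only accidentally agrees.
def Pre_vad_subsample (vad : List Int) (kernel_size : Int) (stride : Int) : Prop :=
  1 ≤ stride ∧ 0 ≤ kernel_size
instance (vad : List Int) (kernel_size : Int) (stride : Int) : Decidable (Pre_vad_subsample vad kernel_size stride) := by unfold Pre_vad_subsample; infer_instance
def pvWitness_vad_subsample : List Int × Int × Int := ([1, 0, 1, 1], 2, 2)
def Spec_vad_subsample (vad : List Int) (kernel_size : Int) (stride : Int) (out : List Int) : Prop := out = vad_subsample_alt vad kernel_size stride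
instance (vad : List Int) (kernel_size : Int) (stride : Int) (out : List Int) : Decidable (Spec_vad_subsample vad kernel_size stride out) := by unfold Spec_vad_subsample; infer_instance

-- ===== CLAIM (what is proved, stated in full; the proofs are below) =====
def Claim_equal_vad_subsample : Prop := ∀ (vad : List Int) (kernel_size : Int) (stride : Int), Dom_vad_subsample vad kernel_size stride → Pre_vad_subsample vad kernel_size stride → Spec_vad_subsample vad kernel_size stride (vad_subsample vad kernel_size stride)

-- ===== LEMMAS AND PROOFS =====

theorem pvClampIdx_of_bounds (L : Nat) (i : Int) (h0 : 0 ≤ i) (hL : i ≤ L) :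
    PySem.List.clampIdx L i = i.toNat := by
  simp only [PySem.List.clampIdx]
  split_ifs <;> omega

theorem pvPrefix_getD (xs : List Int) (acc : Int) (j : Nat) (hj : j ≤ xs.length) :
    (pvPrefix acc xs).getD j 0 = acc + (xs.take j).sum := by
  induction xs generalizing acc j with
  | nil =>
    have : j = 0 := by simpa using hj
    subst this; simp [pvPrefix]
  | cons v vs ih =>
    cases j with
    | zero => simp [pvPrefix]
    | succ j =>
      simp only [pvPrefix, List.getD, List.getElem?_cons_succ, List.take_succ_cons,
        List.sum_cons]
      have := ih (acc + v) j (by simpa using Nat.lt_succ_iff.mp (Nat.lt_succ_of_le (by simpa using hj)))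
      simp only [List.getD] at this
      rw [this]; ring

theorem sum_drop_take (xs : List Int) (lo hi : Nat) (hlo : lo ≤ hi) :
    ((xs.drop lo).take (hi - lo)).sum = (xs.take hi).sum - (xs.take lo).sum := by
  have h : xs.take hi = xs.take lo ++ (xs.drop lo).take (hi - lo) := by
    rw [show hi = lo + (hi - lo) by omega, List.take_add]
    simp
  rw [h, List.sum_append]; ring

-- per-element agreement of the two bodies, for i inside the range
theorem body_eq (vad : List Int) (kernel_size stride : Int)
    (hs : 1 ≤ stride) (hk : 0 ≤ kernel_size) (i : Int) (h0 : 0 ≤ i)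
    (hiW : i * stride + kernel_size ≤ (vad.length : Int)) :
    (let sub := PySem.List.slice vad (some (i * stride)) (some (i * stride + kernel_size))
     if PySem.Int.floordiv (sub.length : Int) 2 + 1 ≤ sub.sum then (1 : Int) else 0)
    =
    (if PySem.Int.floordiv kernel_size 2 + 1 ≤
        PySem.List.pyGetD (pvPrefix 0 vad) (i * stride + kernel_size) 0
        - PySem.List.pyGetD (pvPrefix 0 vad) (i * stride) 0
     then (1 : Int) else 0) := by
  have hlo0 : 0 ≤ i * stride := mul_nonneg h0 (by omega)
  have hloL : i * stride ≤ (vad.length : Int) := by nlinarith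
  have hhi0 : 0 ≤ i * stride + kernel_size := by omega
  set lo : Nat := (i * stride).toNat with hlodef
  set hi : Nat := (i * stride + kernel_size).toNat with hhidef
  have hlohi : lo ≤ hi := by omega
  have hhiL : hi ≤ vad.length := by omega
  have hloL' : lo ≤ vad.length := by omega
  -- A's slice
  have hslice : PySem.List.slice vad (some (i * stride)) (some (i * stride + kernel_size))
      = (vad.drop lo).take (hi - lo) := by
    rw [hlodef, hhidef]
    simp [PySem.List.slice, pvClampIdx_of_bounds _ _ hlo0 hloL,
      pvClampIdx_of_bounds _ _ hhi0 hiW]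
  have hlen : ((vad.drop lo).take (hi - lo)).length = hi - lo := by
    simp only [List.length_take, List.length_drop]
    omega
  -- B's prefix lookups
  have hgetHi : PySem.List.pyGetD (pvPrefix 0 vad) (i * stride + kernel_size) 0
      = (vad.take hi).sum := by
    have hcast : i * stride + kernel_size = ((hi : Nat) : Int) := by omega
    rw [hcast, PySem.List.pyGetD_natCast]
    simpa using pvPrefix_getD vad 0 hi hhiL
  have hgetLo : PySem.List.pyGetD (pvPrefix 0 vad) (i * stride) 0
      = (vad.take lo).sum := by
    have hcast : i * stride = ((lo : Nat) : Int) := by omega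
    rw [hcast, PySem.List.pyGetD_natCast]
    simpa using pvPrefix_getD vad 0 lo hloL'
  have hsum : ((vad.drop lo).take (hi - lo)).sum
      = PySem.List.pyGetD (pvPrefix 0 vad) (i * stride + kernel_size) 0
        - PySem.List.pyGetD (pvPrefix 0 vad) (i * stride) 0 := by
    rw [hgetHi, hgetLo, sum_drop_take vad lo hi hlohi]
  have hlenInt : (((vad.drop lo).take (hi - lo)).length : Int) = kernel_size := by
    rw [hlen]; omega
  rw [hslice]
  simp only [hsum, hlenInt]

-- window upper bound: for 0 ≤ i < n_subsample, the window fits inside vad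
theorem window_le (L kernel_size stride i : Int) (hs : 1 ≤ stride)
    (hi : i < PySem.Int.floordiv (L - kernel_size + stride) stride) :
    i * stride + kernel_size ≤ L := by
  have h := (PySem.Int.le_floordiv_iff_mul_le (a := L - kernel_size + stride)
    (b := stride) (q := i + 1) (by omega)).mpr
  have h2 : (i + 1) ≤ PySem.Int.floordiv (L - kernel_size + stride) stride := by omega
  have h3 := (PySem.Int.le_floordiv_iff_mul_le (a := L - kernel_size + stride)
    (b := stride) (q := i + 1) (by omega)).mp h2
  nlinarith

-- A's append fold is the map of its per-window bit
theorem foldA_eq (vad : List Int) (kernel_size stride : Int) :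
    ∀ (rng : List Int) (acc : List Int),
    rng.foldl
      (fun subsampled_vad i =>
        let sub := PySem.List.slice vad (some (i * stride)) (some (i * stride + kernel_size))
        if PySem.Int.floordiv (sub.length : Int) 2 + 1 ≤ sub.sum then
          subsampled_vad ++ [1]
        else
          subsampled_vad ++ [0]) acc
    = acc ++ rng.map (fun i =>
        let sub := PySem.List.slice vad (some (i * stride)) (some (i * stride + kernel_size))
        if PySem.Int.floordiv (sub.length : Int) 2 + 1 ≤ sub.sum then (1 : Int) else 0) := by
  intro rng
  induction rng with
  | nil => intro acc; simp
  | cons i rest ih =>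
    intro acc
    simp only [List.foldl_cons, List.map_cons]
    rw [ih]
    split_ifs <;> simp

-- ===== VERDICT (by name: the statement is the Claim_ definition above) =====
theorem vad_subsample_spec : Claim_equal_vad_subsample := by
  intro vad kernel_size stride _ hpre
  obtain ⟨hs, hk⟩ := hpre
  unfold Spec_vad_subsample vad_subsample vad_subsample_alt
  simp only
  rw [foldA_eq]
  simp only [List.nil_append]
  apply List.map_congr_left
  intro i hi
  rw [PySem.List.mem_pyRange_one] at hi
  exact body_eq vad kernel_size stride hs hk i hi.1
    (window_le (vad.length : Int) kernel_size stride i hs hi.2)
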